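-- pv_equiv track=rewrite | github.com/ROSMicroPy/device-smartstepper | rmp/SmartStepper.py | _get_request_body
-- ===== SOURCE A (Python) =====
-- def _get_request_body(request):
--     """Extract request body from HTTP request."""
--     lines = request.split('\r\n')
--     body_start = False
--     body = ""
--
--     for line in lines:
--         if body_start:
--             body += line
--         elif line == "":
--             body_start = True
--
--     return body
-- ===== SOURCE B (Python) =====
-- def _get_request_body(request):
--     """Extract request body from HTTP request."""
--     lines = request.split('\r\n')
--     try:
--         idx = lines.index("")
--     except ValueError:
--         return ""
--     return "".join(lines[idx + 1:])
-- ===== Notes on version B (the rewrite author's own statement) =====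
-- stated objective: simpler
-- what changed: Replaces the flag-driven accumulation loop by a locate-then-join decomposition: find the first blank line with list.index and join the slice after it.
import Mathlib
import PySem

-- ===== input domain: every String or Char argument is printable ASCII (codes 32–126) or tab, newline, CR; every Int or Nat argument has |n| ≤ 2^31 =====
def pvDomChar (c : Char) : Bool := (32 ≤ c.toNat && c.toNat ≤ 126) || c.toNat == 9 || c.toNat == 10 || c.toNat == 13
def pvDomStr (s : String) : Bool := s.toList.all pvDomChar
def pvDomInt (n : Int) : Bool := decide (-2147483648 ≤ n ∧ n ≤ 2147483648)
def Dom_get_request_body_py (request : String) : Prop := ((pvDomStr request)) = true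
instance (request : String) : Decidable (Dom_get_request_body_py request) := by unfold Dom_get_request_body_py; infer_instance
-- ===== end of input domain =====

-- B replaces A's flag-driven accumulation loop by locate-the-first-blank-line-then-join (simpler decomposition).

-- ===== PORT A =====
-- A's loop state: (body_start, body); body kept as List Char (Python string concatenation, exact).
def get_request_body_py (request : String) : String :=
  let lines := PySem.Chars.splitOn request.toList ['\r', '\n']
  let st := lines.foldl (fun (st : Bool × List Char) line =>
    if st.1 then (st.1, st.2 ++ line)
    else if line = [] then (true, st.2)
    else st) (false, [])
  String.ofList st.2

-- ===== PORT B =====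
-- B: lines.index("") inside try/except; on success join the slice after it, on ValueError return "".
def get_request_body_py_alt (request : String) : String :=
  let lines := PySem.Chars.splitOn request.toList ['\r', '\n']
  match PySem.List.index? lines ([] : List Char) with
  | some i => String.ofList (PySem.Chars.join [] (lines.drop (i + 1)))
  | none => ""

-- ===== PRECONDITION & SPEC =====
def Spec_get_request_body_py (request : String) (out : String) : Prop := out = get_request_body_py_alt request
instance (request : String) (out : String) : Decidable (Spec_get_request_body_py request out) := by unfold Spec_get_request_body_py; infer_instance

-- ===== CLAIM (what is proved, stated in full; the proofs are below) =====
def Claim_equal_get_request_body_py : Prop := ∀ (request : String), Dom_get_request_body_py request → Spec_get_request_body_py request (get_request_body_py request)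

-- ===== LEMMAS AND PROOFS =====

-- A's loop body, named for the lemmas.
def pvStepA (st : Bool × List Char) (line : List Char) : Bool × List Char :=
  if st.1 then (st.1, st.2 ++ line)
  else if line = [] then (true, st.2)
  else st

lemma foldl_pvStepA_false (lines : List (List Char)) (acc : List Char)
    (h : ([] : List Char) ∉ lines) :
    lines.foldl pvStepA (false, acc) = (false, acc) := by
  induction lines with
  | nil => rfl
  | cons l ls ih =>
    simp only [List.mem_cons, not_or] at h
    have hne : l ≠ [] := fun hh => h.1 hh.symm
    have hstep : pvStepA (false, acc) l = (false, acc) := by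
      simp [pvStepA, hne]
    rw [List.foldl_cons, hstep]
    exact ih h.2

lemma foldl_pvStepA_true (lines : List (List Char)) (acc : List Char) :
    lines.foldl pvStepA (true, acc) = (true, acc ++ lines.flatten) := by
  induction lines generalizing acc with
  | nil => simp
  | cons l ls ih =>
    have hstep : pvStepA (true, acc) l = (true, acc ++ l) := by
      simp [pvStepA]
    rw [List.foldl_cons, hstep, ih, List.flatten_cons, List.append_assoc]

lemma join_nil_eq_flatten (xs : List (List Char)) :
    PySem.Chars.join [] xs = xs.flatten := by
  induction xs with
  | nil => rfl
  | cons l ls ih =>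
    cases ls with
    | nil => simp [PySem.Chars.join, List.intercalate]
    | cons m ms =>
      rw [PySem.Chars.join_cons_cons, ih]
      simp

lemma pv_main_aux (lines : List (List Char)) :
    String.ofList (lines.foldl pvStepA (false, [])).2 =
      (match PySem.List.index? lines ([] : List Char) with
       | some i => String.ofList (PySem.Chars.join [] (lines.drop (i + 1)))
       | none => "") := by
  cases h : PySem.List.index? lines ([] : List Char) with
  | none =>
    rw [PySem.List.index?_eq_none_iff] at h
    simp [foldl_pvStepA_false lines [] h]
  | some i =>
    rw [PySem.List.index?_eq_some_iff] at h
    obtain ⟨pre, suf, hsplit, hlen, hnotin⟩ := h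
    have hstep : pvStepA (false, ([] : List Char)) [] = (true, []) := by
      simp [pvStepA]
    have hdrop : (pre ++ ([] : List Char) :: suf).drop (i + 1) = suf := by
      have h1 : pre ++ ([] : List Char) :: suf = (pre ++ [[]]) ++ suf := by simp
      have h2 : i + 1 = (pre ++ [([] : List Char)]).length := by simp [← hlen]
      rw [h1, h2, List.drop_left]
    rw [hsplit, List.foldl_append, foldl_pvStepA_false pre [] hnotin,
        List.foldl_cons, hstep, foldl_pvStepA_true suf []]
    simp [hdrop, join_nil_eq_flatten]

-- ===== VERDICT (by name: the statement is the Claim_ definition above) =====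
theorem get_request_body_py_spec : Claim_equal_get_request_body_py := by
  intro request _
  unfold Spec_get_request_body_py get_request_body_py get_request_body_py_alt
  exact pv_main_aux (PySem.Chars.splitOn request.toList ['\r', '\n'])
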